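-- pv_equiv track=rewrite | github.com/KhrystynaDyshakant/algo2 | lab4/lab.py | find_root
-- ===== SOURCE A (Python) =====
-- from collections import deque
--
-- def bfs(graph, start_node):
--     visited = set()
--     queue = deque([start_node])
--
--     while queue:
--         node = queue.popleft()
--         visited.add(node)
--         if node in graph:
--             for neighbor in graph[node]:
--                 if neighbor not in visited:
--                     queue.append(neighbor)
--
--     return visited
--
-- def find_root(graph):
--     in_degrees = {node: 0 for node in graph}
--     out_degrees = {node: 0 for node in graph}
--
--     for node in graph:
--         for neighbor in graph[node]:
--             out_degrees[node] += 1
--             if neighbor in in_degrees: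
--                 in_degrees[neighbor] += 1
--
--     root_candidates = [node for node in graph if in_degrees[node] == 0]
--
--     if len(root_candidates) == 0:
--         return -1
--     else:
--         for candidate in root_candidates:
--             visited = bfs(graph, candidate)
--             if len(visited) == len(graph):
--                 return candidate
--
--         return -1
-- ===== SOURCE B (Python) =====
-- def find_root(graph):
--     n = len(graph)
--     children = set()
--     for nbrs in graph.values():
--         children.update(nbrs)
--     for node in graph:
--         if node in children:
--             continue
--         # Kleene fixed-point closure: repeatedly widen by one edge-step until stable
--         reach = {node}
--         while True:
--             bigger = reach | {w for v in reach for w in graph.get(v, ())}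
--             if len(bigger) == len(reach):
--                 break
--             reach = bigger
--         if len(reach) == n:
--             return node
--     return -1
-- ===== Notes on version B (the rewrite author's own statement) =====
-- stated objective: alternative
-- what changed: A builds in/out-degree dicts with a nested counting loop and verifies each zero-in-degree candidate by a deque BFS worklist (pop a node, mark it visited, enqueue unvisited neighbours); B selects candidates via a one-pass 'appears as a child' set and verifies them by a Kleene fixed-point closure - repeatedly widen the whole reachable set by one edge-step (set union with the image of the current set) until its size stops growing - with no queue, no stack and no per-node visited bookkeeping.
import Mathlib
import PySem

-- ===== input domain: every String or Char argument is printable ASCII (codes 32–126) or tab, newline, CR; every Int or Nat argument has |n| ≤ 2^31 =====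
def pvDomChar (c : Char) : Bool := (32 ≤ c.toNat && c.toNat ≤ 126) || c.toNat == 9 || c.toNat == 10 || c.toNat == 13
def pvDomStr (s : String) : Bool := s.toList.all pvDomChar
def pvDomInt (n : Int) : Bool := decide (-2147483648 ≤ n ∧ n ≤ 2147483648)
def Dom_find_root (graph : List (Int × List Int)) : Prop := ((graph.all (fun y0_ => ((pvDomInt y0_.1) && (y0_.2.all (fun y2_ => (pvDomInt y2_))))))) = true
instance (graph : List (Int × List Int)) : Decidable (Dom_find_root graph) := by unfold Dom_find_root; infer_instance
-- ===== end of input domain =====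

-- B replaces A's degree-counting dicts and per-candidate deque-BFS worklist by a one-pass
-- "appears as a child" set and a Kleene fixed-point closure (widen the reachable set by a
-- whole edge-step until its size stops growing): alternative algorithm, no speed claim.

-- ===== PORT A =====
-- termination scaffolding only: the finite universe every enqueued node lives in
def pvAllNbrs (d : PySem.Dict Int (List Int)) : Finset Int := (d.values.flatMap id).toFinset

theorem mem_pvAllNbrs' (d : PySem.Dict Int (List Int)) {v x : Int} {nbrs : List Int}
    (h : d.get? v = some nbrs) (hx : x ∈ nbrs) : x ∈ pvAllNbrs d := by
  have hitems := PySem.Dict.mem_items_of_get?_eq_some d h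
  have hval : nbrs ∈ d.values := by
    simp only [PySem.Dict.values]
    exact List.mem_map_of_mem hitems
  simp [pvAllNbrs]
  exact ⟨nbrs, hval, hx⟩

theorem mem_pvAllNbrs (d : PySem.Dict Int (List Int)) (v x : Int)
    (hx : x ∈ d.getD v []) : x ∈ pvAllNbrs d := by
  rw [PySem.Dict.getD_eq_get?_getD] at hx
  cases h : d.get? v with
  | none => rw [h] at hx; simp at hx
  | some nbrs => rw [h] at hx; simp at hx; exact mem_pvAllNbrs' d h hx

theorem toFinset_set_add (s : PySem.Set Int) (x : Int) :
    (PySem.Set.add s x).toFinset = insert x s.toFinset := by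
  simp only [PySem.Set.add, PySem.Set.contains]
  split
  · next h =>
    rw [List.contains_iff_mem] at h
    ext y; simp only [Finset.mem_insert, List.mem_toFinset]
    constructor
    · tauto
    · rintro (rfl | hy) <;> [exact h; exact hy]
  · ext y; simp [List.toFinset_append]

theorem set_contains_iff (s : PySem.Set Int) (x : Int) :
    PySem.Set.contains s x = true ↔ x ∈ s := by
  simp [PySem.Set.contains]

theorem set_add_of_mem {s : PySem.Set Int} {x : Int} (h : x ∈ s) :
    PySem.Set.add s x = s := by
  simp [PySem.Set.add, PySem.Set.contains, h]

-- A's bfs: while queue: node = popleft(); visited.add(node); if node in graph: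
--          for neighbor in graph[node]: if neighbor not in visited: queue.append(neighbor)
def bfs_loop (d : PySem.Dict Int (List Int)) (visited : PySem.Set Int) (queue : List Int) :
    PySem.Set Int :=
  match queue with
  | [] => visited
  | node :: rest =>
    let visited' := PySem.Set.add visited node
    match _h : d.get? node with
    | some nbrs =>
        bfs_loop d visited' (rest ++ nbrs.filter (fun nb => !(PySem.Set.contains visited' nb)))
    | none => bfs_loop d visited' rest
termination_by ((((pvAllNbrs d) ∪ queue.toFinset) \ visited.toFinset).card,
                queue.countP (fun x => PySem.Set.contains visited x))
decreasing_by
  · by_cases hv : node ∈ visited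
    · -- node already visited: first component unchanged, countP of visited entries drops
      rw [set_add_of_mem hv]
      have heq : ((pvAllNbrs d ∪ (rest ++ List.filter (fun nb => !PySem.Set.contains visited nb) nbrs).toFinset) \ List.toFinset visited)
          = ((pvAllNbrs d ∪ (node :: rest).toFinset) \ List.toFinset visited) := by
        ext y
        simp only [Finset.mem_sdiff, Finset.mem_union, List.toFinset_cons, Finset.mem_insert,
          List.mem_toFinset, List.mem_filter, List.toFinset_append,
          Finset.mem_union]
        constructor
        · rintro ⟨h1, h2⟩
          refine ⟨?_, h2⟩
          rcases h1 with h1 | h1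
          · tauto
          · rcases h1 with h1 | h1
            · tauto
            · exact Or.inl (mem_pvAllNbrs' d _h h1.1)
        · rintro ⟨h1, h2⟩
          refine ⟨?_, h2⟩
          rcases h1 with h1 | (rfl | h1) <;> simp_all
      rw [heq]
      apply Prod.Lex.right
      rw [List.countP_append, List.countP_cons]
      have h0 : List.countP (fun x => PySem.Set.contains (PySem.Set.add visited node) x)
          (List.filter (fun nb => !PySem.Set.contains (PySem.Set.add visited node) nb) nbrs) = 0 := by
        rw [List.countP_eq_zero]
        intro a ha
        have := List.of_mem_filter ha
        simpa using this
      rw [set_add_of_mem hv] at h0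
      rw [h0]
      simp [hv]
    · apply Prod.Lex.left
      apply Finset.card_lt_card
      constructor
      · intro y hy
        simp only [Finset.mem_sdiff, Finset.mem_union, List.mem_toFinset, List.mem_append,
          toFinset_set_add, Finset.mem_insert, List.mem_filter] at hy ⊢
        obtain ⟨h1, h2⟩ := hy
        push Not at h2
        refine ⟨?_, h2.2⟩
        rcases h1 with h1 | (h1 | h1)
        · tauto
        · tauto
        · exact Or.inl (mem_pvAllNbrs' d _h h1.1)
      · intro hsub
        have hnode : node ∈ (pvAllNbrs d ∪ (node :: rest).toFinset) \ List.toFinset visited := by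
          simp [hv]
        have := hsub hnode
        simp [toFinset_set_add] at this
  · by_cases hv : node ∈ visited
    · rw [set_add_of_mem hv]
      have heq : ((pvAllNbrs d ∪ rest.toFinset) \ List.toFinset visited)
          = ((pvAllNbrs d ∪ (node :: rest).toFinset) \ List.toFinset visited) := by
        ext y
        simp only [Finset.mem_sdiff, Finset.mem_union, List.toFinset_cons, Finset.mem_insert,
          List.mem_toFinset]
        constructor
        · rintro ⟨h1, h2⟩; exact ⟨by tauto, h2⟩
        · rintro ⟨h1, h2⟩
          refine ⟨?_, h2⟩
          rcases h1 with h1 | (rfl | h1) <;> tauto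
      rw [heq]
      apply Prod.Lex.right
      rw [List.countP_cons]
      simp [hv]
    · apply Prod.Lex.left
      apply Finset.card_lt_card
      constructor
      · intro y hy
        simp only [Finset.mem_sdiff, Finset.mem_union, List.mem_toFinset,
          toFinset_set_add, Finset.mem_insert] at hy ⊢
        obtain ⟨h1, h2⟩ := hy
        push Not at h2
        refine ⟨?_, h2.2⟩
        tauto
      · intro hsub
        have hnode : node ∈ (pvAllNbrs d ∪ (node :: rest).toFinset) \ List.toFinset visited := by
          simp [hv]
        have := hsub hnode
        simp [toFinset_set_add] at this

def bfs (d : PySem.Dict Int (List Int)) (start : Int) : PySem.Set Int :=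
  bfs_loop d PySem.Set.empty [start]

-- A: for candidate in root_candidates: if len(bfs(graph, candidate)) == len(graph): return candidate
def find_root_scan (d : PySem.Dict Int (List Int)) : List Int → Int
  | [] => -1
  | c :: cs =>
    if PySem.Set.len (bfs d c) == (d.size : Int) then c else find_root_scan d cs

def find_root (graph : List (Int × List Int)) : Int :=
  let d : PySem.Dict Int (List Int) := PySem.Dict.mk graph
  let in0 : PySem.Dict Int Int := d.keys.foldl (fun m k => m.insert k 0) PySem.Dict.empty
  let out0 : PySem.Dict Int Int := d.keys.foldl (fun m k => m.insert k 0) PySem.Dict.empty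
  let in_degrees := d.keys.foldl (fun m node =>
    (d.getD node []).foldl (fun m nb =>
      if m.contains nb then m.modify nb 0 (· + 1) else m) m) in0
  -- out_degrees is computed and never read in A; ported as its own (independent) loop
  let _out_degrees := d.keys.foldl (fun m node =>
    (d.getD node []).foldl (fun m _nb => m.modify node 0 (· + 1)) m) out0
  let root_candidates := d.keys.filter (fun node => in_degrees.getD node 0 == 0)
  if root_candidates.length = 0 then -1
  else find_root_scan d root_candidates

-- ===== PORT B =====
-- B's Kleene closure: while True: bigger = reach | {w for v in reach for w in graph.get(v, ())};
--                     if len(bigger) == len(reach): break; reach = bigger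
-- (only size and membership of the sets matter downstream, so the set-iteration order is irrelevant)
def kstep (d : PySem.Dict Int (List Int)) (reach : PySem.Set Int) : PySem.Set Int :=
  PySem.Set.update reach (reach.flatMap (fun v => d.getD v []))

def kleene (d : PySem.Dict Int (List Int)) (reach : PySem.Set Int) : PySem.Set Int :=
  let bigger := kstep d reach
  if PySem.Set.len bigger == PySem.Set.len reach then reach
  else kleene d bigger
termination_by ((pvAllNbrs d) \ reach.toFinset).card
decreasing_by
  rename_i hlen
  simp only [bigger, PySem.Set.len, kstep] at hlen ⊢
  have hb : PySem.Set.update reach (reach.flatMap (fun v => d.getD v []))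
      = reach ++ (PySem.Set.ofList (reach.flatMap (fun v => d.getD v []))).filter
          (fun y => !(PySem.Set.contains reach y)) :=
    PySem.Set.update_eq_append_filter ..
  rw [hb] at hlen ⊢
  have hne : (PySem.Set.ofList (reach.flatMap (fun v => d.getD v []))).filter
      (fun y => !(PySem.Set.contains reach y)) ≠ [] := by
    intro h
    rw [h] at hlen
    simp at hlen
  obtain ⟨x, hxf⟩ := List.exists_mem_of_ne_nil _ hne
  have hxo := List.mem_of_mem_filter hxf
  have hxr : x ∉ reach := by
    have := List.of_mem_filter hxf
    simpa [set_contains_iff] using this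
  have hxn : x ∈ pvAllNbrs d := by
    rw [PySem.Set.mem_ofList] at hxo
    obtain ⟨v, _, hv⟩ := List.mem_flatMap.1 hxo
    exact mem_pvAllNbrs d v x hv
  apply Finset.card_lt_card
  constructor
  · intro y hy
    simp only [Finset.mem_sdiff, List.mem_toFinset, List.mem_append] at hy ⊢
    exact ⟨hy.1, fun h => hy.2 (Or.inl h)⟩
  · intro hsub
    have hx : x ∈ pvAllNbrs d \ reach.toFinset := by
      simp only [Finset.mem_sdiff, List.mem_toFinset]
      exact ⟨hxn, hxr⟩
    have := hsub hx
    simp only [Finset.mem_sdiff, List.mem_toFinset, List.mem_append] at this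
    exact this.2 (Or.inr hxf)

-- B: for node in graph: if node in children: continue; reach = closure; if len(reach)==n: return node
def find_root_alt_scan (d : PySem.Dict Int (List Int)) (children : PySem.Set Int) (n : Nat) :
    List Int → Int
  | [] => -1
  | node :: rest =>
    if PySem.Set.contains children node then find_root_alt_scan d children n rest
    else
      if PySem.Set.len (kleene d (PySem.Set.ofList [node])) == (n : Int) then node
      else find_root_alt_scan d children n rest

def find_root_alt (graph : List (Int × List Int)) : Int :=
  let d : PySem.Dict Int (List Int) := PySem.Dict.mk graph
  let children := d.values.foldl (fun s nbrs => PySem.Set.update s nbrs) PySem.Set.empty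
  find_root_alt_scan d children d.size d.keys

-- ===== PRECONDITION & SPEC =====
-- Pre_: the association list stands for a Python dict, so its keys are distinct
-- (a list with a repeated key does not correspond to any input A can receive).
def Pre_find_root (graph : List (Int × List Int)) : Prop := (graph.map (·.1)).Nodup
instance (graph : List (Int × List Int)) : Decidable (Pre_find_root graph) := by
  unfold Pre_find_root; infer_instance

def pvWitness_find_root : (List (Int × List Int)) := [(1, [2, 3]), (2, [3]), (3, [])]

def Spec_find_root (graph : List (Int × List Int)) (out : Int) : Prop := out = find_root_alt graph
instance (graph : List (Int × List Int)) (out : Int) : Decidable (Spec_find_root graph out) := by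
  unfold Spec_find_root; infer_instance

-- ===== CLAIM (what is proved, stated in full; the proofs are below) =====
def Claim_equal_find_root : Prop := ∀ (graph : List (Int × List Int)), Dom_find_root graph →
  Pre_find_root graph → Spec_find_root graph (find_root graph)

-- ===== LEMMAS AND PROOFS =====

-- reachability along the graph's edges (get? = Python's `node in graph` + `graph[node]`)
inductive Reach (d : PySem.Dict Int (List Int)) (s : Int) : Int → Prop
  | refl : Reach d s s
  | step {v w : Int} {nbrs : List Int} :
      Reach d s v → d.get? v = some nbrs → w ∈ nbrs → Reach d s w

theorem Reach.trans {d : PySem.Dict Int (List Int)} {a b c : Int}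
    (h1 : Reach d a b) (h2 : Reach d b c) : Reach d a c := by
  induction h2 with
  | refl => exact h1
  | step _ hg hm ih => exact Reach.step ih hg hm

-- ---- A's loop ----
theorem bfs_loop_grow (d : PySem.Dict Int (List Int)) (visited : PySem.Set Int)
    (queue : List Int) (x : Int) (hx : x ∈ visited ∨ x ∈ queue) :
    x ∈ bfs_loop d visited queue := by
  fun_induction bfs_loop with
  | case1 => simpa using hx
  | case2 visited node rest visited' nbrs _h ih =>
    apply ih
    rcases hx with hx | hx
    · exact Or.inl ((PySem.Set.mem_add visited node x).2 (Or.inl hx))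
    · rcases List.mem_cons.1 hx with rfl | hx
      · exact Or.inl ((PySem.Set.mem_add visited x x).2 (Or.inr rfl))
      · exact Or.inr (List.mem_append_left _ hx)
  | case3 visited node rest visited' _h ih =>
    apply ih
    rcases hx with hx | hx
    · exact Or.inl ((PySem.Set.mem_add visited node x).2 (Or.inl hx))
    · rcases List.mem_cons.1 hx with rfl | hx
      · exact Or.inl ((PySem.Set.mem_add visited x x).2 (Or.inr rfl))
      · exact Or.inr hx

theorem bfs_loop_closed (d : PySem.Dict Int (List Int)) (visited : PySem.Set Int)
    (queue : List Int)
    (hcl : ∀ v ∈ visited, ∀ nbrs, d.get? v = some nbrs → ∀ w ∈ nbrs, w ∈ visited ∨ w ∈ queue) :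
    ∀ v ∈ bfs_loop d visited queue, ∀ nbrs, d.get? v = some nbrs →
      ∀ w ∈ nbrs, w ∈ bfs_loop d visited queue := by
  fun_induction bfs_loop with
  | case1 =>
    intro v hv nbrs hg w hw
    rcases hcl v hv nbrs hg w hw with h | h
    · exact h
    · simp at h
  | case2 visited node rest visited' nbrs _h ih =>
    apply ih
    intro v hv nbrs' hg' w hw
    rcases (PySem.Set.mem_add visited node v).1 hv with hv | rfl
    · rcases hcl v hv nbrs' hg' w hw with h | h
      · exact Or.inl ((PySem.Set.mem_add visited node w).2 (Or.inl h))
      · rcases List.mem_cons.1 h with rfl | h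
        · exact Or.inl ((PySem.Set.mem_add visited w w).2 (Or.inr rfl))
        · exact Or.inr (List.mem_append_left _ h)
    · rw [_h] at hg'
      obtain rfl := Option.some.inj hg'
      by_cases hc : PySem.Set.contains (PySem.Set.add visited v) w
      · exact Or.inl ((set_contains_iff _ w).1 hc)
      · refine Or.inr (List.mem_append_right _ ?_)
        refine List.mem_filter.2 ⟨hw, ?_⟩
        show (!(PySem.Set.contains (PySem.Set.add visited v) w)) = true
        cases hcc : PySem.Set.contains (PySem.Set.add visited v) w
        · rfl
        · exact absurd hcc hc
  | case3 visited node rest visited' _h ih =>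
    apply ih
    intro v hv nbrs' hg' w hw
    rcases (PySem.Set.mem_add visited node v).1 hv with hv | rfl
    · rcases hcl v hv nbrs' hg' w hw with h | h
      · exact Or.inl ((PySem.Set.mem_add visited node w).2 (Or.inl h))
      · rcases List.mem_cons.1 h with rfl | h
        · exact Or.inl ((PySem.Set.mem_add visited w w).2 (Or.inr rfl))
        · exact Or.inr h
    · rw [_h] at hg'; exact absurd hg' (by simp)

theorem bfs_loop_sound (d : PySem.Dict Int (List Int)) (visited : PySem.Set Int)
    (queue : List Int) (x : Int) (hx : x ∈ bfs_loop d visited queue) :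
    x ∈ visited ∨ ∃ q ∈ queue, Reach d q x := by
  fun_induction bfs_loop with
  | case1 => exact Or.inl hx
  | case2 visited node rest visited' nbrs _h ih =>
    rcases ih hx with h | ⟨q, hq, hr⟩
    · rcases (PySem.Set.mem_add visited node x).1 h with h | rfl
      · exact Or.inl h
      · exact Or.inr ⟨x, List.mem_cons_self .., Reach.refl⟩
    · rcases List.mem_append.1 hq with hq | hq
      · exact Or.inr ⟨q, List.mem_cons_of_mem _ hq, hr⟩
      · have hqn : q ∈ nbrs := (List.mem_filter.1 hq).1
        exact Or.inr ⟨node, List.mem_cons_self ..,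
          Reach.trans (Reach.step Reach.refl _h hqn) hr⟩
  | case3 visited node rest visited' _h ih =>
    rcases ih hx with h | ⟨q, hq, hr⟩
    · rcases (PySem.Set.mem_add visited node x).1 h with h | rfl
      · exact Or.inl h
      · exact Or.inr ⟨x, List.mem_cons_self .., Reach.refl⟩
    · exact Or.inr ⟨q, List.mem_cons_of_mem _ hq, hr⟩

theorem bfs_loop_nodup (d : PySem.Dict Int (List Int)) (visited : PySem.Set Int)
    (queue : List Int) (h : visited.Nodup) : (bfs_loop d visited queue).Nodup := by
  fun_induction bfs_loop with
  | case1 => exact h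
  | case2 visited node rest visited' nbrs _h ih => exact ih (PySem.Set.nodup_add visited node h)
  | case3 visited node rest visited' _h ih => exact ih (PySem.Set.nodup_add visited node h)

theorem bfs_mem (d : PySem.Dict Int (List Int)) (start x : Int) :
    x ∈ bfs d start ↔ Reach d start x := by
  constructor
  · intro hx
    rcases bfs_loop_sound d PySem.Set.empty [start] x hx with h | ⟨q, hq, hr⟩
    · simp [PySem.Set.empty] at h
    · rcases List.mem_singleton.1 hq with rfl
      exact hr
  · intro hr
    induction hr with
    | refl => exact bfs_loop_grow d _ _ _ (Or.inr (List.mem_singleton.2 rfl))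
    | step _ hg hm ih =>
      exact bfs_loop_closed d PySem.Set.empty [start]
        (by intro v hv; simp [PySem.Set.empty] at hv) _ ih _ hg _ hm

-- ---- B's closure ----
theorem kleene_grow (d : PySem.Dict Int (List Int)) (reach : PySem.Set Int)
    (x : Int) (hx : x ∈ reach) : x ∈ kleene d reach := by
  fun_induction kleene with
  | case1 reach bigger hlen => exact hx
  | case2 reach bigger hlen ih =>
    apply ih
    simp only [bigger, kstep, PySem.Set.mem_update]
    exact Or.inl hx

theorem kleene_sound (d : PySem.Dict Int (List Int)) (c : Int) (reach : PySem.Set Int)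
    (hr : ∀ x ∈ reach, Reach d c x) : ∀ x ∈ kleene d reach, Reach d c x := by
  fun_induction kleene with
  | case1 reach bigger hlen => exact hr
  | case2 reach bigger hlen ih =>
    apply ih
    intro x hx
    simp only [bigger, kstep, PySem.Set.mem_update] at hx
    rcases hx with hx | hx
    · exact hr x hx
    · obtain ⟨v, hv, hxv⟩ := List.mem_flatMap.1 hx
      rw [PySem.Dict.getD_eq_get?_getD] at hxv
      cases hg : d.get? v with
      | none => rw [hg] at hxv; simp at hxv
      | some nbrs =>
        rw [hg] at hxv; simp at hxv
        exact Reach.step (hr v hv) hg hxv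

theorem kleene_closed (d : PySem.Dict Int (List Int)) (reach : PySem.Set Int) :
    ∀ v ∈ kleene d reach, ∀ nbrs, d.get? v = some nbrs →
      ∀ w ∈ nbrs, w ∈ kleene d reach := by
  fun_induction kleene with
  | case1 reach bigger hlen =>
    -- at the fixpoint: len bigger = len reach forces the appended new-element list to be empty,
    -- so every neighbour of a member of reach is already in reach
    intro v hv nbrs hg w hw
    simp only [bigger, kstep, PySem.Set.len] at hlen
    have hb : PySem.Set.update reach (reach.flatMap (fun v => d.getD v []))
        = reach ++ (PySem.Set.ofList (reach.flatMap (fun v => d.getD v []))).filter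
        (fun y => !(PySem.Set.contains reach y)) :=
      PySem.Set.update_eq_append_filter ..
    rw [hb] at hlen
    have hnil : (PySem.Set.ofList (reach.flatMap (fun v => d.getD v []))).filter
        (fun y => !(PySem.Set.contains reach y)) = [] := by
      by_contra h
      rw [List.length_append] at hlen
      have := List.length_pos_of_ne_nil h
      simp only [beq_iff_eq] at hlen
      omega
    have hwf : w ∈ reach.flatMap (fun v => d.getD v []) := by
      refine List.mem_flatMap.2 ⟨v, hv, ?_⟩
      rw [PySem.Dict.getD_eq_get?_getD, hg]
      exact hw
    by_contra hwr
    have : w ∈ (PySem.Set.ofList (reach.flatMap (fun v => d.getD v []))).filter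
        (fun y => !(PySem.Set.contains reach y)) := by
      refine List.mem_filter.2 ⟨(PySem.Set.mem_ofList ..).2 hwf, ?_⟩
      cases hc : PySem.Set.contains reach w
      · rfl
      · exact absurd ((set_contains_iff reach w).1 hc) hwr
    rw [hnil] at this
    simp at this
  | case2 reach bigger hlen ih => exact ih

theorem kleene_nodup (d : PySem.Dict Int (List Int)) (reach : PySem.Set Int)
    (h : reach.Nodup) : (kleene d reach).Nodup := by
  fun_induction kleene with
  | case1 reach bigger hlen => exact h
  | case2 reach bigger hlen ih => exact ih (PySem.Set.nodup_update reach _ h)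

theorem kleene_mem (d : PySem.Dict Int (List Int)) (c x : Int) :
    x ∈ kleene d (PySem.Set.ofList [c]) ↔ Reach d c x := by
  constructor
  · intro hx
    refine kleene_sound d c _ ?_ x hx
    intro y hy
    rcases List.mem_singleton.1 ((PySem.Set.mem_ofList ..).1 hy) with rfl
    exact Reach.refl
  · intro hr
    induction hr with
    | refl => exact kleene_grow d _ _ ((PySem.Set.mem_ofList ..).2 (List.mem_singleton.2 rfl))
    | step _ hg hm ih => exact kleene_closed d _ _ ih _ hg _ hm

-- the two traversals visit the same number of nodes
theorem traverse_len (d : PySem.Dict Int (List Int)) (c : Int) :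
    PySem.Set.len (bfs d c) = PySem.Set.len (kleene d (PySem.Set.ofList [c])) := by
  have h1 : (bfs d c).Nodup := bfs_loop_nodup d _ _ List.nodup_nil
  have h2 : (kleene d (PySem.Set.ofList [c])).Nodup :=
    kleene_nodup d _ (PySem.Set.nodup_ofList [c])
  have hm : (bfs d c).toFinset = (kleene d (PySem.Set.ofList [c])).toFinset := by
    ext y
    simp only [List.mem_toFinset]
    rw [bfs_mem, kleene_mem]
  simp only [PySem.Set.len]
  congr 1
  rw [← List.toFinset_card_of_nodup h1, ← List.toFinset_card_of_nodup h2, hm]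

-- ---- candidate condition ----
theorem inner_fold_contains (l : List Int) (m : PySem.Dict Int Int) (j : Int) :
    (l.foldl (fun m nb => if m.contains nb then m.modify nb 0 (· + 1) else m) m).contains j
      = m.contains j := by
  induction l generalizing m with
  | nil => rfl
  | cons nb l ih =>
    simp only [List.foldl_cons]
    rw [ih]
    by_cases hc : m.contains nb
    · simp only [hc, if_pos]
      rw [PySem.Dict.contains_modify]
      by_cases hj : j = nb
      · subst hj; simp [hc]
      · simp [hj]
    · simp [hc]

theorem inner_fold_getD (l : List Int) (m : PySem.Dict Int Int) (k : Int) :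
    ((l.foldl (fun m nb => if m.contains nb then m.modify nb 0 (· + 1) else m) m).getD k 0)
      = m.getD k 0 + (if m.contains k then (l.count k : Int) else 0) := by
  induction l generalizing m with
  | nil => simp
  | cons nb l ih =>
    simp only [List.foldl_cons]
    rw [ih]
    by_cases hc : m.contains nb
    · simp only [hc, if_pos]
      rw [PySem.Dict.getD_modify]
      have hcm : ∀ j, (m.modify nb 0 (· + 1)).contains j = (j == nb || m.contains j) :=
        fun j => PySem.Dict.contains_modify m nb j 0 _
      by_cases hk : k = nb
      · subst hk
        rw [if_pos rfl, hcm k]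
        simp only [BEq.rfl, Bool.true_or, if_pos, hc, List.count_cons_self]
        push_cast
        ring
      · rw [if_neg hk, hcm k]
        have : (k == nb) = false := by simp [hk]
        rw [this, Bool.false_or]
        have hnk : ¬ nb = k := fun h => hk h.symm
        simp [hnk]
    · simp only [hc, Bool.false_eq_true, if_false]
      have hk2 : m.contains k → k ≠ nb := by
        intro h1 h2; subst h2; simp [h1] at hc
      by_cases hck : m.contains k
      · have hnk : ¬ nb = k := fun h => (hk2 hck) h.symm
        simp [hnk, hck]
      · simp [hck]

theorem outer_fold_getD (d : PySem.Dict Int (List Int)) (L : List Int)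
    (m : PySem.Dict Int Int) (k : Int) :
    (L.foldl (fun m node => (d.getD node []).foldl (fun m nb =>
        if m.contains nb then m.modify nb 0 (· + 1) else m) m) m).getD k 0
      = m.getD k 0 + (if m.contains k
          then ((L.flatMap (fun node => d.getD node [])).count k : Int) else 0) := by
  induction L generalizing m with
  | nil => simp
  | cons node L ih =>
    simp only [List.foldl_cons, List.flatMap_cons]
    rw [ih, inner_fold_contains, inner_fold_getD]
    by_cases hc : m.contains k
    · simp only [hc, if_pos, List.count_append]
      push_cast
      ring
    · simp [hc]

theorem init_contains (L : List Int) (m : PySem.Dict Int Int) (j : Int) :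
    (L.foldl (fun m k => m.insert k (0 : Int)) m).contains j
      = (decide (j ∈ L) || m.contains j) := by
  induction L generalizing m with
  | nil => simp
  | cons a L ih =>
    simp only [List.foldl_cons]
    rw [ih, PySem.Dict.contains_insert]
    by_cases hj : j ∈ L <;> by_cases ha : j = a <;> simp [hj, ha]

theorem init_getD (L : List Int) (m : PySem.Dict Int Int) (j : Int) :
    (L.foldl (fun m k => m.insert k (0 : Int)) m).getD j 0
      = if j ∈ L then 0 else m.getD j 0 := by
  induction L generalizing m with
  | nil => simp
  | cons a L ih =>
    simp only [List.foldl_cons]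
    rw [ih, PySem.Dict.getD_insert]
    by_cases hj : j ∈ L <;> by_cases ha : j = a <;> simp [hj, ha]

-- membership in B's `children` set
theorem mem_children_fold (Ls : List (List Int)) (s : PySem.Set Int) (y : Int) :
    y ∈ Ls.foldl (fun s l => PySem.Set.update s l) s ↔ y ∈ s ∨ ∃ l ∈ Ls, y ∈ l := by
  induction Ls generalizing s with
  | nil => simp
  | cons l Ls ih =>
    simp only [List.foldl_cons]
    rw [ih]
    have : y ∈ PySem.Set.update s l ↔ y ∈ s ∨ y ∈ l := PySem.Set.mem_update ..
    rw [this]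
    simp only [List.mem_cons]
    constructor
    · rintro ((h | h) | ⟨l', hl', hy⟩)
      · exact Or.inl h
      · exact Or.inr ⟨l, Or.inl rfl, h⟩
      · exact Or.inr ⟨l', Or.inr hl', hy⟩
    · rintro (h | ⟨l', (rfl | hl'), hy⟩)
      · exact Or.inl (Or.inl h)
      · exact Or.inl (Or.inr hy)
      · exact Or.inr ⟨l', hl', hy⟩

-- the two scans agree element by element
theorem scan_eq (d : PySem.Dict Int (List Int)) (children : PySem.Set Int)
    (inDeg : PySem.Dict Int Int) (L : List Int)
    (h : ∀ k ∈ L, (inDeg.getD k 0 == 0) = !(PySem.Set.contains children k)) :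
    find_root_scan d (L.filter (fun node => inDeg.getD node 0 == 0))
      = find_root_alt_scan d children d.size L := by
  induction L with
  | nil => rfl
  | cons k L ih =>
    have hk := h k (List.mem_cons_self ..)
    have hL := fun a ha => h a (List.mem_cons_of_mem _ ha)
    by_cases hc : (inDeg.getD k 0 == 0) = true
    · rw [List.filter_cons, if_pos hc]
      have hct : PySem.Set.contains children k = false := by
        rw [hc] at hk; cases hcc : PySem.Set.contains children k
        · rfl
        · rw [hcc] at hk; simp at hk
      simp only [find_root_scan, find_root_alt_scan, hct, Bool.false_eq_true, if_false]
      rw [traverse_len d k]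
      by_cases hlen : (PySem.Set.len (kleene d (PySem.Set.ofList [k])) == (d.size : Int)) = true
      · rw [if_pos hlen, if_pos hlen]
      · rw [if_neg hlen, if_neg hlen]
        exact ih hL
    · simp only [Bool.not_eq_true] at hc
      rw [List.filter_cons, if_neg (by simp [hc])]
      have hct : PySem.Set.contains children k = true := by
        rw [hc] at hk
        cases hcc : PySem.Set.contains children k
        · rw [hcc] at hk; simp at hk
        · rfl
      simp only [find_root_alt_scan, hct, if_pos]
      exact ih hL

-- ===== VERDICT (by name: the statement is the Claim_ definition above) =====
theorem find_root_spec : Claim_equal_find_root := by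
  intro graph _hdom hpre
  unfold Spec_find_root find_root find_root_alt
  simp only []
  set d : PySem.Dict Int (List Int) := PySem.Dict.mk graph with hd
  have hnd : d.keys.Nodup := by
    rw [hd, PySem.Dict.keys_mk]
    exact hpre
  set inDeg := d.keys.foldl (fun m node =>
    (d.getD node []).foldl (fun m nb =>
      if m.contains nb then m.modify nb 0 (· + 1) else m) m)
    (d.keys.foldl (fun m k => m.insert k (0 : Int)) PySem.Dict.empty) with hin
  set children := d.values.foldl (fun s nbrs => PySem.Set.update s nbrs) PySem.Set.empty
    with htg
  have hflat : ∀ y : Int, (y ∈ children) ↔ y ∈ d.keys.flatMap (fun node => d.getD node []) := by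
    intro y
    rw [htg, mem_children_fold]
    rw [PySem.Dict.values_eq_map_keys d hnd []]
    simp only [PySem.Set.empty, List.not_mem_nil, false_or, List.mem_flatMap, List.mem_map]
    constructor
    · rintro ⟨l, ⟨node, hnode, rfl⟩, hy⟩
      exact ⟨node, hnode, hy⟩
    · rintro ⟨node, hnode, hy⟩
      exact ⟨d.getD node [], ⟨node, hnode, rfl⟩, hy⟩
  have hcond : ∀ k ∈ d.keys, (inDeg.getD k 0 == 0) = !(PySem.Set.contains children k) := by
    intro k hk
    have h1 : inDeg.getD k 0 = ((d.keys.flatMap (fun node => d.getD node [])).count k : Int) := by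
      rw [hin, outer_fold_getD, init_getD, init_contains]
      simp [hk]
    by_cases hmem : k ∈ d.keys.flatMap (fun node => d.getD node [])
    · have hct : PySem.Set.contains children k = true :=
        (set_contains_iff children k).2 ((hflat k).2 hmem)
      rw [hct, h1]
      have : (d.keys.flatMap (fun node => d.getD node [])).count k ≠ 0 := by
        rw [← List.count_pos_iff] at hmem
        omega
      simp [this]
    · have hct : PySem.Set.contains children k = false := by
        cases hcc : PySem.Set.contains children k
        · rfl
        · exact absurd ((hflat k).1 ((set_contains_iff children k).1 hcc)) hmem
      rw [hct, h1]
      rw [← List.count_eq_zero] at hmem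
      simp [hmem]
  have hmain := scan_eq d children inDeg d.keys hcond
  by_cases hz : (d.keys.filter (fun node => inDeg.getD node 0 == 0)).length = 0
  · rw [if_pos hz]
    rw [List.length_eq_zero_iff] at hz
    rw [hz] at hmain
    exact hmain
  · rw [if_neg hz]
    exact hmain
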